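-- pv_equiv track=rewrite | github.com/m-bilu/latexResumeAgent | nodes/parse_resume.py | parse_resumeitems
-- ===== SOURCE A (Python) =====
-- from typing import Dict, List, Tuple
--
-- def find_ending_brace(s: str, start: int) -> int:
--     # Handles nested braces
--     if s[start] not in "{[":
--         return -1
--     open_brace = s[start]
--     close_brace = "}" if open_brace == "{" else "]"
--     count = 0
--     for i in range(start, len(s)):
--         if s[i] == open_brace:
--             count += 1
--         elif s[i] == close_brace:
--             count -= 1
--             if count == 0:
--                 return i
--     return -1
--
-- def parse_resumeitems(content: str) -> List[str]:
--     '''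
--     Takes a block of LaTeX content and returns a list of strings inside each \resumeItem{...} block.
--     Ignores all other content.
--     '''
--     items = []
--     tag = "\\resumeItem{"
--
--     i = 0
--
--     while i < len(content):
--         start = content.find(tag, i)
--         if start == -1:
--             break
--         brace_start = start + len(tag) - 1  # index of the opening {
--         brace_end = find_ending_brace(content, brace_start)
--         item_content = content[brace_start + 1: brace_end].strip()
--         items.append(item_content)
--         i = brace_end + 1
--
--     return items
-- ===== SOURCE B (Python) =====
-- def parse_resumeitems(content):
--     '''
--     Takes a block of LaTeX content and returns a list of strings inside each \resumeItem{...} block.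
--     Ignores all other content.
--     Single flat character-level state machine instead of repeated find/slice passes.
--     '''
--     tag = "\\resumeItem{"
--     items = []
--     buf = []
--     inside = False
--     depth = 0
--     i = 0
--     n = len(content)
--     while i < n:
--         if not inside:
--             if content[i:i + len(tag)] == tag:
--                 inside = True
--                 depth = 1
--                 buf = []
--                 i += len(tag)
--             else:
--                 i += 1
--         else:
--             c = content[i]
--             if c == '{':
--                 depth += 1
--                 buf.append(c)
--             elif c == '}':
--                 depth -= 1
--                 if depth == 0:
--                     items.append(''.join(buf).strip())
--                     inside = False
--                 else:
--                     buf.append(c)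
--             else:
--                 buf.append(c)
--             i += 1
--     return items
-- ===== Notes on version B (the rewrite author's own statement) =====
-- stated objective: alternative
-- what changed: Replaces A's repeated find()/find_ending_brace()/slice passes over the whole string with a single flat character-level state machine (inside flag, depth counter, character buffer) that makes one pass and never re-scans.
-- outside the precondition, e.g. on parse_resumeitems('\\resumeItem{a'): A does not finish within the time limit, B returns []
import Mathlib
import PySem

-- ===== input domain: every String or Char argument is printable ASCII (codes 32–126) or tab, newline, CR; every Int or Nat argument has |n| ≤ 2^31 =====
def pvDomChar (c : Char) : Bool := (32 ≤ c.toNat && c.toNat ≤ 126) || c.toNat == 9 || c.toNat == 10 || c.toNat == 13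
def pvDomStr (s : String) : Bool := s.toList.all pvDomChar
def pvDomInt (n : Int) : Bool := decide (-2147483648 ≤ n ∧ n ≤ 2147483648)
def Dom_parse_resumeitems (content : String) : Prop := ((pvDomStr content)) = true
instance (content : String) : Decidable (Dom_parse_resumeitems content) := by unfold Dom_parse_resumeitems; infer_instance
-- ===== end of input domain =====

-- B replaces A's repeated find/brace-rescan/slice passes with one flat character-level
-- state machine (inside flag, depth counter, buffer); return values agree on Pre_.

-- ===== PORT A =====

def pvTag : List Char := "\\resumeItem{".toList

-- the 'for i in range(start, len(s))' counting loop of find_ending_brace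
def pvFebAux : List Char → Nat → Char → Char → Int → Int
  | [], _, _, _, _ => -1
  | c :: rest, i, ob, cb, count =>
    if c = ob then pvFebAux rest (i + 1) ob cb (count + 1)
    else if c = cb then
      (if count - 1 = 0 then (i : Int) else pvFebAux rest (i + 1) ob cb (count - 1))
    else pvFebAux rest (i + 1) ob cb count

def pvFindEndingBrace (s : List Char) (start : Nat) : Int :=
  match PySem.List.pyGet? s (start : Int) with
  | none => -1          -- s[start] out of range: unreachable from parse_resumeitems' calls
  | some ob =>
    if ¬ (ob = '{' ∨ ob = '[') then -1       -- s[start] not in "{["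
    else
      let cb := if ob = '{' then '}' else ']'
      pvFebAux (s.drop start) start ob cb 0

-- the 'while i < len(content)' loop of A; fuel only makes the recursion total
-- (on every input admitted by Pre_ the fuel content.length + 1 is never exhausted)
def pvALoop (cs : List Char) (fuel : Nat) (i : Nat) (items : List String) : List String :=
  match fuel with
  | 0 => items
  | fuel + 1 =>
    if i < cs.length then
      let f := PySem.Chars.findFrom cs pvTag (i : Int) none      -- content.find(tag, i)
      if f = -1 then items
      else
        let start := f.toNat
        let bs := start + 11                                      -- brace_start
        let be := pvFindEndingBrace cs bs                         -- brace_end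
        let item := String.ofList (PySem.Chars.strip
          (PySem.List.slice cs (some ((bs + 1 : Nat) : Int)) (some be)))
        pvALoop cs fuel (be + 1).toNat (items ++ [item])
    else items

def parse_resumeitems (content : String) : List String :=
  pvALoop content.toList (content.toList.length + 1) 0 []

-- ===== PORT B =====

-- the single while loop of B over the remaining characters
def pvBLoop : List Char → Bool → Int → List Char → List String → List String
  | [], _, _, _, items => items
  | c :: rest, inside, depth, buf, items =>
    if inside = false then
      if (c :: rest).take 12 = pvTag then
        pvBLoop ((c :: rest).drop 12) true 1 [] items
      else pvBLoop rest false depth buf items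
    else
      if c = '{' then pvBLoop rest true (depth + 1) (buf ++ [c]) items
      else if c = '}' then
        (if depth - 1 = 0 then
          pvBLoop rest false 0 buf (items ++ [String.ofList (PySem.Chars.strip buf)])
        else pvBLoop rest true (depth - 1) (buf ++ [c]) items)
      else pvBLoop rest true depth (buf ++ [c]) items
  termination_by l _ _ _ _ => l.length
  decreasing_by all_goals simp

def parse_resumeitems_alt (content : String) : List String :=
  pvBLoop content.toList false 0 [] []

-- ===== PRECONDITION & SPEC =====

-- index (within l) of the char closing an open brace group of current depth d, if any
def pvCloseIdx : List Char → Nat → Option Nat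
  | [], _ => none
  | c :: t, d =>
    let d' := if c = '{' then d + 1 else if c = '}' then d - 1 else d
    if d' = 0 then some 0 else (pvCloseIdx t d').map (· + 1)

-- Pre_ excludes inputs containing a resumeItem tag whose opening brace is never balanced
-- by a matching close brace: on those A resets i via brace_end = -1 and loops forever
-- (it never returns a value), while B finishes its single pass.
def Pre_parse_resumeitems (content : String) : Prop :=
  ∀ j < content.toList.length, pvTag <+: content.toList.drop j →
    (pvCloseIdx (content.toList.drop (j + 12)) 1).isSome = true
instance (content : String) : Decidable (Pre_parse_resumeitems content) := by
  unfold Pre_parse_resumeitems; infer_instance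

def pvWitness_parse_resumeitems : String := "x\\resumeItem{ a{b} }y"

def Spec_parse_resumeitems (content : String) (out : List String) : Prop := out = parse_resumeitems_alt content
instance (content : String) (out : List String) : Decidable (Spec_parse_resumeitems content out) := by unfold Spec_parse_resumeitems; infer_instance

-- ===== CLAIM (what is proved, stated in full; the proofs are below) =====
def Claim_equal_parse_resumeitems : Prop := ∀ (content : String), Dom_parse_resumeitems content → Pre_parse_resumeitems content → Spec_parse_resumeitems content (parse_resumeitems content)

-- ===== LEMMAS AND PROOFS =====

lemma pvTag_len : pvTag.length = 12 := by decide

lemma pvTag_ne_nil : pvTag ≠ [] := by decide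

lemma pvFebAux_some : ∀ (m : List Char) (i d k : Nat), 1 ≤ d → pvCloseIdx m d = some k →
    pvFebAux m i '{' '}' (d : Int) = ((i + k : Nat) : Int) := by
  intro m
  induction m with
  | nil => intro i d k _ h; simp [pvCloseIdx] at h
  | cons c t ih =>
    intro i d k hd h
    by_cases hc : c = '{'
    · subst hc
      simp only [pvCloseIdx, reduceIte] at h
      rw [if_neg (by omega : ¬ (d + 1 = 0))] at h
      simp only [Option.map_eq_some_iff] at h
      obtain ⟨k', hk', rfl⟩ := h
      have hcast : ((d : Int) + 1) = ((d + 1 : Nat) : Int) := by push_cast; ring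
      simp only [pvFebAux, reduceIte, hcast]
      rw [ih (i+1) (d+1) k' (by omega) hk']
      congr 1; omega
    · by_cases hc2 : c = '}'
      · subst hc2
        simp only [pvCloseIdx, reduceIte, if_neg hc] at h
        rcases Nat.eq_or_lt_of_le hd with h1 | h2
        · have hd1 : d = 1 := h1.symm
          subst hd1
          norm_num at h
          subst h
          simp only [pvFebAux, reduceIte, if_neg hc]
          norm_num
        · rw [if_neg (by omega : ¬ (d - 1 = 0))] at h
          simp only [Option.map_eq_some_iff] at h
          obtain ⟨k', hk', rfl⟩ := h
          have hcast : ((d : Int) - 1) = ((d - 1 : Nat) : Int) := by omega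
          simp only [pvFebAux, reduceIte, if_neg hc]
          rw [if_neg (by omega : ¬ ((d : Int) - 1 = 0)), hcast,
            ih (i+1) (d-1) k' (by omega) hk']
          congr 1; omega
      · simp only [pvCloseIdx, if_neg hc, if_neg hc2] at h
        rw [if_neg (by omega : ¬ (d = 0))] at h
        simp only [Option.map_eq_some_iff] at h
        obtain ⟨k', hk', rfl⟩ := h
        simp only [pvFebAux, if_neg hc, if_neg hc2]
        rw [ih (i+1) d k' hd hk']
        congr 1; omega

-- when not inside a block, the stale depth and buffer do not influence pvBLoop
lemma pvBLoop_outside_congr : ∀ (l : List Char) (d d' : Int) (buf buf' : List Char)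
    (items : List String), pvBLoop l false d buf items = pvBLoop l false d' buf' items := by
  intro l
  induction l with
  | nil => intro d d' buf buf' items; simp [pvBLoop]
  | cons c t ih =>
    intro d d' buf buf' items
    by_cases htag : (c :: t).take 12 = pvTag
    · simp only [pvBLoop, reduceIte, if_pos htag]
    · simp only [pvBLoop, reduceIte, if_neg htag]
      exact ih d d' buf buf' items

lemma pvBLoop_inside : ∀ (m : List Char) (d k : Nat) (buf : List Char) (items : List String),
    1 ≤ d → pvCloseIdx m d = some k →
    pvBLoop m true (d : Int) buf items =
      pvBLoop (m.drop (k + 1)) false 0 []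
        (items ++ [String.ofList (PySem.Chars.strip (buf ++ m.take k))]) := by
  intro m
  induction m with
  | nil => intro d k buf items _ h; simp [pvCloseIdx] at h
  | cons c t ih =>
    intro d k buf items hd h
    by_cases hc : c = '{'
    · subst hc
      simp only [pvCloseIdx, reduceIte] at h
      rw [if_neg (by omega : ¬ (d + 1 = 0))] at h
      simp only [Option.map_eq_some_iff] at h
      obtain ⟨k', hk', rfl⟩ := h
      have hcast : ((d : Int) + 1) = ((d + 1 : Nat) : Int) := by push_cast; ring
      simp only [pvBLoop, reduceIte, hcast]
      rw [ih (d+1) k' (buf ++ ['{']) items (by omega) hk']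
      simp
    · by_cases hc2 : c = '}'
      · subst hc2
        simp only [pvCloseIdx, reduceIte, if_neg hc] at h
        rcases Nat.eq_or_lt_of_le hd with h1 | h2
        · have hd1 : d = 1 := h1.symm
          subst hd1
          norm_num at h
          subst h
          simp only [pvBLoop, reduceIte, if_neg hc]
          norm_num
          exact pvBLoop_outside_congr _ _ _ _ _ _
        · rw [if_neg (by omega : ¬ (d - 1 = 0))] at h
          simp only [Option.map_eq_some_iff] at h
          obtain ⟨k', hk', rfl⟩ := h
          have hcast : ((d : Int) - 1) = ((d - 1 : Nat) : Int) := by omega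
          simp only [pvBLoop, reduceIte, if_neg hc]
          rw [if_neg (by omega : ¬ ((d : Int) - 1 = 0)), hcast,
            ih (d-1) k' (buf ++ ['}']) items (by omega) hk']
          simp
      · simp only [pvCloseIdx, if_neg hc, if_neg hc2] at h
        rw [if_neg (by omega : ¬ (d = 0))] at h
        simp only [Option.map_eq_some_iff] at h
        obtain ⟨k', hk', rfl⟩ := h
        simp only [pvBLoop, if_neg hc, if_neg hc2]
        rw [ih d k' (buf ++ [c]) items hd hk']
        simp

lemma pvBLoop_skip_none : ∀ (l : List Char) (d : Int) (buf : List Char) (items : List String),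
    (∀ j, ¬ pvTag <+: l.drop j) → pvBLoop l false d buf items = items := by
  intro l
  induction l with
  | nil => intro d buf items _; simp [pvBLoop]
  | cons c t ih =>
    intro d buf items h
    have htag : ¬ (c :: t).take 12 = pvTag := by
      intro he
      exact h 0 (by rw [List.drop_zero, List.prefix_iff_eq_take, pvTag_len, he])
    simp only [pvBLoop, reduceIte, if_neg htag]
    exact ih d buf items (fun j => h (j + 1))

lemma pvBLoop_skip_some : ∀ (m : Nat) (l : List Char) (d : Int) (buf : List Char)
    (items : List String), pvTag <+: l.drop m → (∀ j, j < m → ¬ pvTag <+: l.drop j) →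
    pvBLoop l false d buf items = pvBLoop (l.drop (m + 12)) true 1 [] items := by
  intro m
  induction m with
  | zero =>
    intro l d buf items hp _
    rw [List.drop_zero] at hp
    match l, hp with
    | [], hp => exact absurd (List.prefix_nil.mp hp) pvTag_ne_nil
    | c :: t, hp =>
      have htag : (c :: t).take 12 = pvTag := by
        rw [List.prefix_iff_eq_take, pvTag_len] at hp; exact hp.symm
      simp only [pvBLoop, reduceIte, if_pos htag, Nat.zero_add]
  | succ m ih =>
    intro l d buf items hp hmin
    match l with
    | [] =>
      rw [List.drop_nil] at hp
      exact absurd (List.prefix_nil.mp hp) pvTag_ne_nil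
    | c :: t =>
      have htag : ¬ (c :: t).take 12 = pvTag := by
        intro he
        exact hmin 0 (by omega) (by rw [List.drop_zero, List.prefix_iff_eq_take, pvTag_len, he])
      simp only [pvBLoop, reduceIte, if_neg htag]
      rw [ih t d buf items hp (fun j hj => hmin (j + 1) (by omega))]
      rfl

lemma pvMain (cs : List Char)
    (hpre : ∀ j, pvTag <+: cs.drop j → (pvCloseIdx (cs.drop (j + 12)) 1).isSome = true) :
    ∀ (fuel i : Nat) (items : List String), cs.length < fuel + i →
      pvALoop cs fuel i items = pvBLoop (cs.drop i) false 0 [] items := by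
  intro fuel
  induction fuel with
  | zero =>
    intro i items hfi
    rw [List.drop_eq_nil_of_le (by omega)]
    simp [pvALoop, pvBLoop]
  | succ fuel ih =>
    intro i items hfi
    by_cases hi : i < cs.length
    · by_cases hF : PySem.Chars.findFrom cs pvTag (i : Int) none = -1
      · -- no further tag: both return items
        rw [PySem.Chars.findFrom_natCast_eq_neg_one_iff cs pvTag i (by omega)] at hF
        simp only [pvALoop, if_pos hi]
        rw [if_pos (by rw [PySem.Chars.findFrom_natCast_eq_neg_one_iff cs pvTag i (by omega)]; exact hF)]
        refine (pvBLoop_skip_none _ _ _ _ ?_).symm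
        intro j hpref
        exact hF ((hpref.isInfix).trans (List.drop_suffix j _).isInfix)
      · -- a tag is found; one block is extracted on both sides, then recurse
        have hil : i ≤ cs.length := le_of_lt hi
        obtain ⟨hge, hpref, hmin⟩ := PySem.Chars.findFrom_natCast_spec cs pvTag i hil hF
        have h0F : (0 : Int) ≤ PySem.Chars.findFrom cs pvTag (i : Int) none := by
          calc (0 : Int) ≤ (i : Int) := by positivity
          _ ≤ _ := hge
        set s := (PySem.Chars.findFrom cs pvTag (i : Int) none).toNat with hs
        have hFs : PySem.Chars.findFrom cs pvTag (i : Int) none = (s : Int) :=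
          (Int.toNat_of_nonneg h0F).symm
        have his : i ≤ s := by omega
        obtain ⟨t, ht⟩ := hpref
        have ht' : cs.drop s = pvTag ++ t := ht.symm
        have hsplit : pvTag = "\\resumeItem".toList ++ ['{'] := by decide
        have hdrop11 : cs.drop (s + 11) = '{' :: t := by
          rw [← List.drop_drop (i := 11) (j := s) (l := cs), ht', hsplit, List.append_assoc,
            show (11 : Nat) = ("\\resumeItem".toList).length from by decide, List.drop_left]
          rfl
        have hdrop12 : cs.drop (s + 12) = t := by
          rw [← List.drop_drop (i := 12) (j := s) (l := cs), ht',
            show (12 : Nat) = pvTag.length from by decide, List.drop_left]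
        obtain ⟨k, hk⟩ : ∃ k, pvCloseIdx t 1 = some k := by
          have := hpre s ⟨t, ht⟩
          rw [hdrop12, Option.isSome_iff_exists] at this
          exact this
        have hget : PySem.List.pyGet? cs ((s + 11 : Nat) : Int) = some '{' := by
          rw [PySem.List.pyGet?_natCast]
          have h := List.getElem?_drop (xs := cs) (i := s + 11) (j := 0)
          rw [hdrop11] at h
          simpa using h.symm
        have hfeb : pvFindEndingBrace cs (s + 11) = ((s + 12 + k : Nat) : Int) := by
          unfold pvFindEndingBrace
          rw [hget]
          simp only [reduceIte, hdrop11]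
          norm_num
          simp only [pvFebAux, reduceIte]
          rw [show ((0 : Int) + 1) = ((1 : Nat) : Int) from by norm_num,
            pvFebAux_some t (s + 11 + 1) 1 k (le_refl 1) hk]
          all_goals (push_cast; ring)
        -- unfold one step of A
        simp only [pvALoop, if_pos hi, hFs]
        rw [if_neg (by omega : ¬ ((s : Nat) : Int) = -1)]
        simp only [Int.toNat_natCast, hfeb]
        -- unfold B: skip to the tag, open the block, close it at index k of t
        rw [pvBLoop_skip_some (s - i) (cs.drop i) 0 [] items
            (by rw [List.drop_drop, show i + (s - i) = s from by omega]; exact ⟨t, ht⟩)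
            (fun j hj => by
              rw [List.drop_drop]
              exact hmin (i + j) (by omega) (by omega))]
        rw [List.drop_drop, show i + (s - i + 12) = s + 12 from by omega, hdrop12]
        have hbi := pvBLoop_inside t 1 k [] items (le_refl 1) hk
        norm_num at hbi
        rw [hbi]
        -- both continuations are one recursive call at index s + 13 + k
        have hdropk : t.drop (k + 1) = cs.drop (s + 13 + k) := by
          rw [← hdrop12, List.drop_drop, show s + 12 + (k + 1) = s + 13 + k from by omega]
        have hitem : PySem.List.slice cs (some ((s + 11 + 1 : Nat) : Int))
            (some ((s + 12 + k : Nat) : Int)) = t.take k := by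
          rw [PySem.List.slice_natCast, show s + 11 + 1 = s + 12 from by omega, hdrop12]
          congr 1
          omega
        rw [show (((s + 12 + k : Nat) : Int) + 1).toNat = s + 13 + k from by omega]
        rw [ih (s + 13 + k) _ (by omega), hdropk, hitem]
    · rw [List.drop_eq_nil_of_le (by omega)]
      simp [pvALoop, pvBLoop, hi]

-- ===== VERDICT (by name: the statement is the Claim_ definition above) =====
theorem parse_resumeitems_spec : Claim_equal_parse_resumeitems := by
  intro content _ hpre
  unfold Pre_parse_resumeitems at hpre
  unfold Spec_parse_resumeitems parse_resumeitems parse_resumeitems_alt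
  have hpre' : ∀ j, pvTag <+: content.toList.drop j →
      (pvCloseIdx (content.toList.drop (j + 12)) 1).isSome = true := by
    intro j hp
    by_cases hj : j < content.toList.length
    · exact hpre j hj hp
    · exfalso
      rw [List.drop_eq_nil_of_le (by omega)] at hp
      exact pvTag_ne_nil (List.prefix_nil.mp hp)
  rw [pvMain content.toList hpre' (content.toList.length + 1) 0 [] (by omega), List.drop_zero]
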